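-- pv_equiv track=rewrite | github.com/stakiran/isemuge | epub/convert.py | get_converted_lines
-- ===== SOURCE A (Python) =====
-- def get_converted_lines(lines):
--     new_lines = []
--
--     count_blankline_continuous = 0
--     is_prev_line_section = False
--
--     for i,line in enumerate(lines):
--         is_sentence_line = False
--         is_section_line = False
--         is_blank_line = False
--         is_eol = False
--
--         if i == len(lines)-1:
--             is_eol = True
--
--         if len(line.strip())==0:
--             is_blank_line = True
--         elif line[0] == '#':
--             is_section_line = True
--         else:
--             is_sentence_line = True
--
--         if is_sentence_line and count_blankline_continuous==0:
--             if not(is_prev_line_section):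
--                 new_lines.append('')
--             new_lines.append(line)
--             # update state
--             # -> nothing
--             continue
--
--         if is_sentence_line and count_blankline_continuous!=0:
--             new_lines.append('')
--             new_lines.append('<br>'*count_blankline_continuous)
--             new_lines.append('')
--             new_lines.append(line)
--             # update state
--             count_blankline_continuous = 0
--             is_prev_line_section = False
--             continue
--
--         if is_blank_line:
--             # update state
--             count_blankline_continuous += 1
--             is_prev_line_section = False
--             continue
--
--         if is_section_line:
--             new_lines.append('')
--             new_lines.append('<div style="page-break-before:always"></div>')
--             new_lines.append('')
--             new_lines.append(line)
--             # update state
--             count_blankline_continuous = 0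
--             is_prev_line_section = True
--             continue
--
--         raise RuntimeError('ここには来ないはずだが')
--
--     return new_lines
-- ===== SOURCE B (Python) =====
-- # Two-pass re-implementation: tokenize lines (collapsing each maximal blank run
-- # into one counted token), then emit markup with one-token lookahead.
-- def get_converted_lines(lines):
--     # pass 1: token list; a maximal run of blank lines becomes one ('blank', n)
--     tokens = []
--     i = 0
--     n_lines = len(lines)
--     while i < n_lines:
--         line = lines[i]
--         if len(line.strip()) == 0:
--             j = i
--             while j < n_lines and len(lines[j].strip()) == 0:
--                 j += 1
--             tokens.append(('blank', j - i))
--             i = j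
--         elif line[0] == '#':
--             tokens.append(('section', line))
--             i += 1
--         else:
--             tokens.append(('sentence', line))
--             i += 1
--     # pass 2: emit, looking one token ahead after a blank run
--     out = []
--     prev_section = False
--     k = 0
--     n_tok = len(tokens)
--     while k < n_tok:
--         kind, payload = tokens[k]
--         if kind == 'blank':
--             if k + 1 < n_tok and tokens[k + 1][0] == 'sentence':
--                 out.extend(['', '<br>' * payload, '', tokens[k + 1][1]])
--                 k += 2
--             else:
--                 k += 1
--             prev_section = False
--         elif kind == 'sentence':
--             if not prev_section:
--                 out.append('')
--             out.append(payload)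
--             k += 1
--         else:  # section
--             out.extend(['', '<div style="page-break-before:always"></div>', '', payload])
--             prev_section = True
--             k += 1
--     return out
-- ===== Notes on version B (the rewrite author's own statement) =====
-- stated objective: alternative
-- what changed: Replaces A's single-pass state machine (blank counter + prev-section flag threaded through one loop) by two passes: a tokenizer that collapses each maximal blank run into one counted token, then an emitter that walks the token list with one-token lookahead after a blank run.
import Mathlib
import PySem

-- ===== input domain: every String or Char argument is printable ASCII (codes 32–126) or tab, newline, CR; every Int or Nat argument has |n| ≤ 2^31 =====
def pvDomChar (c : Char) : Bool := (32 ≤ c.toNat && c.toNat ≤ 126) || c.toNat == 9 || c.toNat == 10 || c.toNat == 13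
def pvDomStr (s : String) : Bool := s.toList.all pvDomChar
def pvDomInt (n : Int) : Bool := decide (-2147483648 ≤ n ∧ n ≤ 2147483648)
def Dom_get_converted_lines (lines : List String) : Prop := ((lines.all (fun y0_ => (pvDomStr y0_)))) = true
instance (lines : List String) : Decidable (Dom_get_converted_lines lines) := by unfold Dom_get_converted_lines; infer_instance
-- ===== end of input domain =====

-- B replaces A's one-pass counter/flag state machine by two passes — tokenize with
-- blank-run collapsing, then emit with one-token lookahead (objective: alternative).

-- shared string constants/helpers (both Pythons use the same literals and '<br>'*n)
def pvIsBlank (s : String) : Bool := PySem.Str.len (PySem.Str.strip s) == 0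
def pvDivider : String := "<div style=\"page-break-before:always\"></div>"
def pvBrs (n : Nat) : String := PySem.Str.join "" (List.replicate n "<br>")

-- ===== PORT A =====
-- the body of A's for-loop (one step of the state machine)
def pvStepA (total : Int) (st : List String × Nat × Bool) (p : Int × String) :
    List String × Nat × Bool :=
  let i := p.1
  let line := p.2
  let new_lines := st.1
  let cnt := st.2.1
  let prev := st.2.2
  -- is_eol is computed by A but never used
  let _is_eol := decide (i = total - 1)
  let is_blank := pvIsBlank line
  let is_section := !is_blank && (PySem.Str.pyGet? line 0 == some '#')
  let is_sentence := !is_blank && !is_section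
  if is_sentence && cnt == 0 then
    ((if !prev then new_lines ++ [""] else new_lines) ++ [line], cnt, prev)
  else if is_sentence && cnt != 0 then
    (new_lines ++ ["", pvBrs cnt, "", line], 0, false)
  else if is_blank then
    (new_lines, cnt + 1, false)
  else
    (new_lines ++ ["", pvDivider, "", line], 0, true)

def get_converted_lines (lines : List String) : List String :=
  ((PySem.List.enumerate lines).foldl (pvStepA lines.length) (([] : List String), 0, false)).1

-- ===== PORT B =====
inductive PvTok where
  | blank : Nat → PvTok
  | sec : String → PvTok
  | sent : String → PvTok
deriving DecidableEq, Repr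

-- pass 1 of Source B: a maximal blank run becomes one counted token
def pvTokenize : List String → List PvTok
  | [] => []
  | x :: xs =>
    if pvIsBlank x then
      let m := (xs.takeWhile pvIsBlank).length
      PvTok.blank (m + 1) :: pvTokenize (xs.drop m)
    else if PySem.Str.pyGet? x 0 == some '#' then
      PvTok.sec x :: pvTokenize xs
    else
      PvTok.sent x :: pvTokenize xs
termination_by l => l.length
decreasing_by
  · simp only [List.length_drop, List.length_cons]; omega
  · simp
  · simp

-- pass 2 of Source B: emit, looking one token ahead after a blank run
def pvEmit : Bool → List PvTok → List String
  | _, [] => []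
  | _, PvTok.blank n :: PvTok.sent s :: ts => "" :: pvBrs n :: "" :: s :: pvEmit false ts
  | _, PvTok.blank _ :: ts => pvEmit false ts
  | prev, PvTok.sent s :: ts => (if !prev then [""] else []) ++ s :: pvEmit prev ts
  | _, PvTok.sec s :: ts => "" :: pvDivider :: "" :: s :: pvEmit true ts

def get_converted_lines_alt (lines : List String) : List String :=
  pvEmit false (pvTokenize lines)

-- ===== PRECONDITION & SPEC =====
def Spec_get_converted_lines (lines : List String) (out : List String) : Prop := out = get_converted_lines_alt lines
instance (lines : List String) (out : List String) : Decidable (Spec_get_converted_lines lines out) := by unfold Spec_get_converted_lines; infer_instance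

-- ===== CLAIM (what is proved, stated in full; the proofs are below) =====
def Claim_equal_get_converted_lines : Prop := ∀ (lines : List String), Dom_get_converted_lines lines → Spec_get_converted_lines lines (get_converted_lines lines)

-- ===== LEMMAS AND PROOFS =====

-- index-free recursive form of A's loop
def pvGo (cnt : Nat) (prev : Bool) (acc : List String) : List String → List String
  | [] => acc
  | line :: rest =>
    if pvIsBlank line then pvGo (cnt + 1) false acc rest
    else if PySem.Str.pyGet? line 0 == some '#' then
      pvGo 0 true (acc ++ ["", pvDivider, "", line]) rest
    else if cnt = 0 then
      pvGo cnt prev ((if !prev then acc ++ [""] else acc) ++ [line]) rest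
    else
      pvGo 0 false (acc ++ ["", pvBrs cnt, "", line]) rest

lemma pvStepA_blank (t : Int) (acc : List String) (cnt : Nat) (prev : Bool) (k : Int)
    (x : String) (hb : pvIsBlank x = true) :
    pvStepA t (acc, cnt, prev) (k, x) = (acc, cnt + 1, false) := by
  simp [pvStepA, hb]

lemma pvStepA_section (t : Int) (acc : List String) (cnt : Nat) (prev : Bool) (k : Int)
    (x : String) (hb : pvIsBlank x = false) (hs : (PySem.Str.pyGet? x 0 == some '#') = true) :
    pvStepA t (acc, cnt, prev) (k, x) = (acc ++ ["", pvDivider, "", x], 0, true) := by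
  have hs' : PySem.List.pyGet? x.toList 0 = some '#' := by simpa using hs
  simp [pvStepA, hb, hs']

lemma pvStepA_sent_zero (t : Int) (acc : List String) (prev : Bool) (k : Int)
    (x : String) (hb : pvIsBlank x = false) (hs : (PySem.Str.pyGet? x 0 == some '#') = false) :
    pvStepA t (acc, 0, prev) (k, x) =
      ((if !prev then acc ++ [""] else acc) ++ [x], 0, prev) := by
  have hs' : ¬ PySem.List.pyGet? x.toList 0 = some '#' := by simpa using hs
  simp [pvStepA, hb, hs']

lemma pvStepA_sent_pos (t : Int) (acc : List String) (cnt : Nat) (prev : Bool) (k : Int)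
    (x : String) (hb : pvIsBlank x = false) (hs : (PySem.Str.pyGet? x 0 == some '#') = false)
    (hc : cnt ≠ 0) :
    pvStepA t (acc, cnt, prev) (k, x) = (acc ++ ["", pvBrs cnt, "", x], 0, false) := by
  have hs' : ¬ PySem.List.pyGet? x.toList 0 = some '#' := by simpa using hs
  simp [pvStepA, hb, hs', hc]

lemma foldA_eq_pvGo (t : Int) :
    ∀ (l : List String) (k : Int) (acc : List String) (cnt : Nat) (prev : Bool),
    ((PySem.List.enumerate l k).foldl (pvStepA t) (acc, cnt, prev)).1 = pvGo cnt prev acc l := by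
  intro l
  induction l with
  | nil => intro k acc cnt prev; simp [PySem.List.enumerate_nil, pvGo]
  | cons x xs ih =>
    intro k acc cnt prev
    rw [PySem.List.enumerate_cons, List.foldl_cons]
    by_cases hb : pvIsBlank x = true
    · rw [pvStepA_blank t acc cnt prev k x hb, pvGo, if_pos hb]
      exact ih (k + 1) acc (cnt + 1) false
    · simp only [Bool.not_eq_true] at hb
      by_cases hs : (PySem.Str.pyGet? x 0 == some '#') = true
      · rw [pvStepA_section t acc cnt prev k x hb hs, pvGo, if_neg (by rw [hb]; exact Bool.false_ne_true), if_pos hs]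
        exact ih (k + 1) (acc ++ ["", pvDivider, "", x]) 0 true
      · simp only [Bool.not_eq_true] at hs
        rw [pvGo, if_neg (by simp [hb]), if_neg (by rw [hs]; exact Bool.false_ne_true)]
        by_cases hc : cnt = 0
        · subst hc
          rw [pvStepA_sent_zero t acc prev k x hb hs, if_pos rfl]
          exact ih (k + 1) ((if !prev then acc ++ [""] else acc) ++ [x]) 0 prev
        · rw [pvStepA_sent_pos t acc cnt prev k x hb hs hc, if_neg hc]
          exact ih (k + 1) (acc ++ ["", pvBrs cnt, "", x]) 0 false

-- prepend a pending blank count onto a token list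
def pvPend (c : Nat) (ts : List PvTok) : List PvTok :=
  if c = 0 then ts
  else
    match ts with
    | PvTok.blank n :: ts' => PvTok.blank (c + n) :: ts'
    | ts => PvTok.blank c :: ts

lemma pvPend_blank (c n : Nat) (ts : List PvTok) :
    pvPend c (PvTok.blank n :: ts) = PvTok.blank (c + n) :: ts := by
  by_cases hc : c = 0 <;> simp [pvPend, hc]

lemma pvEmit_blank_sent (p : Bool) (n : Nat) (s : String) (ts : List PvTok) :
    pvEmit p (PvTok.blank n :: PvTok.sent s :: ts) =
      "" :: pvBrs n :: "" :: s :: pvEmit false ts := by simp [pvEmit]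

lemma pvEmit_blank_nil (p : Bool) (n : Nat) : pvEmit p [PvTok.blank n] = [] := by simp [pvEmit]

lemma pvEmit_blank_blank (p : Bool) (n m : Nat) (ts : List PvTok) :
    pvEmit p (PvTok.blank n :: PvTok.blank m :: ts) =
      pvEmit false (PvTok.blank m :: ts) := by simp [pvEmit]

lemma pvEmit_blank_sec (p : Bool) (n : Nat) (s : String) (ts : List PvTok) :
    pvEmit p (PvTok.blank n :: PvTok.sec s :: ts) =
      pvEmit false (PvTok.sec s :: ts) := by simp [pvEmit]

lemma pvEmit_sent (p : Bool) (s : String) (ts : List PvTok) :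
    pvEmit p (PvTok.sent s :: ts) = (if !p then [""] else []) ++ s :: pvEmit p ts := by
  cases p <;> simp [pvEmit]

lemma pvEmit_sec (p : Bool) (s : String) (ts : List PvTok) :
    pvEmit p (PvTok.sec s :: ts) = "" :: pvDivider :: "" :: s :: pvEmit true ts := by
  simp [pvEmit]

lemma pvEmit_blank_irrel (p q : Bool) (n : Nat) (ts : List PvTok) :
    pvEmit p (PvTok.blank n :: ts) = pvEmit q (PvTok.blank n :: ts) := by
  cases ts with
  | nil => rw [pvEmit_blank_nil, pvEmit_blank_nil]
  | cons t ts' =>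
    cases t with
    | blank m => rw [pvEmit_blank_blank, pvEmit_blank_blank]
    | sec s => rw [pvEmit_blank_sec, pvEmit_blank_sec]
    | sent s => rw [pvEmit_blank_sent, pvEmit_blank_sent]

lemma pvPend_succ_tokenize (xs : List String) (c : Nat) :
    pvPend (c + 1) (pvTokenize xs) =
      PvTok.blank (c + 1 + (xs.takeWhile pvIsBlank).length) ::
        pvTokenize (xs.drop (xs.takeWhile pvIsBlank).length) := by
  cases xs with
  | nil => simp [pvTokenize, pvPend]
  | cons y ys =>
    by_cases hy : pvIsBlank y = true
    · rw [pvTokenize, if_pos hy]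
      simp only [List.takeWhile_cons_of_pos hy, List.length_cons, List.drop_succ_cons]
      rw [pvPend_blank]
    · have hy' : pvIsBlank y = false := by simpa using hy
      simp only [List.takeWhile_cons_of_neg hy, List.length_nil, List.drop_zero,
        Nat.add_zero]
      rw [pvTokenize, if_neg hy]
      by_cases hs : (PySem.Str.pyGet? y 0 == some '#') = true
      · rw [if_pos hs]; simp [pvPend]
      · rw [if_neg hs]; simp [pvPend]

lemma pvGo_eq_emit :
    ∀ (l : List String) (cnt : Nat) (prev : Bool) (acc : List String),
    pvGo cnt prev acc l = acc ++ pvEmit prev (pvPend cnt (pvTokenize l)) := by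
  intro l
  induction l with
  | nil =>
    intro cnt prev acc
    by_cases hc : cnt = 0 <;> simp [pvGo, pvTokenize, pvPend, hc, pvEmit]
  | cons x xs ih =>
    intro cnt prev acc
    by_cases hb : pvIsBlank x = true
    · rw [pvGo, if_pos hb]
      rw [ih]
      rw [pvPend_succ_tokenize]
      conv_rhs => rw [pvTokenize, if_pos hb, pvPend_blank]
      rw [pvEmit_blank_irrel prev false]
      have hn : cnt + 1 + (xs.takeWhile pvIsBlank).length
          = cnt + ((xs.takeWhile pvIsBlank).length + 1) := by omega
      rw [hn]
    · rw [pvGo, if_neg hb, pvTokenize, if_neg hb]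
      by_cases hs : (PySem.Str.pyGet? x 0 == some '#') = true
      · rw [if_pos hs, if_pos hs, ih]
        by_cases hc : cnt = 0
        · subst hc
          simp only [pvPend, if_true]
          rw [pvEmit_sec]
          simp
        · simp only [pvPend, if_neg hc]
          rw [pvEmit_blank_sec, pvEmit_sec]
          simp
      · rw [if_neg hs, if_neg hs]
        by_cases hc : cnt = 0
        · rw [if_pos hc, ih]
          subst hc
          simp only [pvPend, if_true]
          rw [pvEmit_sent]
          cases prev <;> simp
        · rw [if_neg hc, ih]
          simp only [pvPend, if_neg hc]
          rw [pvEmit_blank_sent]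
          simp

-- ===== VERDICT (by name: the statement is the Claim_ definition above) =====
theorem get_converted_lines_spec : Claim_equal_get_converted_lines := by
  intro lines _
  show get_converted_lines lines = get_converted_lines_alt lines
  rw [get_converted_lines]
  rw [foldA_eq_pvGo lines.length lines 0 [] 0 false]
  rw [pvGo_eq_emit]
  simp [pvPend, get_converted_lines_alt]
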